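-- pv_equiv track=rewrite | github.com/punkryn/ryu_algo | 비밀번호발음하기.py | isStrict2
-- ===== SOURCE A (Python) =====
-- def isStrict2(word):
--     cnt = 0
--     cur = ''
--     for w in word:
--         if w == 'e' or w == 'o':
--             cur = ''
--             cnt = 0
--             continue
--         if cur != w:
--             cur = w
--             cnt = 0
--         cnt += 1
--         if cnt == 2:
--             return True
--     return False
-- ===== SOURCE B (Python) =====
-- def isStrict2(word):
--     return any(a == b and a != 'e' and a != 'o' for a, b in zip(word, word[1:]))
-- ===== Notes on version B (the rewrite author's own statement) =====
-- stated objective: simpler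
-- what changed: Replaces the stateful cur/cnt loop with a short-circuiting adjacent-pair scan: any equal consecutive pair whose character is not 'e'/'o'.
import Mathlib
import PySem

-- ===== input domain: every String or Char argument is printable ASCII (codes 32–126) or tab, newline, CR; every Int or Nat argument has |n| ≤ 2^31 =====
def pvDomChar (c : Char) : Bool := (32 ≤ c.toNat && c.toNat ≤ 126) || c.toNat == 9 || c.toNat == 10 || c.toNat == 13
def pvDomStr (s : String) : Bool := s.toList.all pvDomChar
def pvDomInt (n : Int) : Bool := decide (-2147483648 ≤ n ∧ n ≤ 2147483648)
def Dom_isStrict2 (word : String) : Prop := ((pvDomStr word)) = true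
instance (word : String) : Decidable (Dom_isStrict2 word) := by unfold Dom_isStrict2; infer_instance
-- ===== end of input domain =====

-- ===== PORT A =====
-- go: the for-loop; cur = '' is encoded as none, cur = w as some w; early return via Bool result
def isStrict2Go : List Char → Option Char → Nat → Bool
  | [], _, _ => false
  | w :: ws, cur, cnt =>
    if w = 'e' ∨ w = 'o' then
      isStrict2Go ws none 0
    else
      let p := if cur ≠ some w then (some w, 0) else (cur, cnt)
      let cnt' := p.2 + 1
      if cnt' = 2 then true else isStrict2Go ws p.1 cnt'

def isStrict2 (word : String) : Bool := isStrict2Go word.toList none 0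

-- ===== PORT B =====
def isStrict2_alt (word : String) : Bool :=
  (word.toList.zip word.toList.tail).any (fun p => p.1 == p.2 && !(p.1 == 'e') && !(p.1 == 'o'))

-- ===== PRECONDITION & SPEC =====
def Spec_isStrict2 (word : String) (out : Bool) : Prop := out = isStrict2_alt word
instance (word : String) (out : Bool) : Decidable (Spec_isStrict2 word out) := by unfold Spec_isStrict2; infer_instance

-- ===== CLAIM (what is proved, stated in full; the proofs are below) =====
def Claim_equal_isStrict2 : Prop := ∀ (word : String), Dom_isStrict2 word → Spec_isStrict2 word (isStrict2 word)

-- ===== LEMMAS AND PROOFS =====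

-- ===== VERDICT (by name: the statement is the Claim_ definition above) =====
-- both components needed mutually in each induction step
theorem isStrict2Go_pair (cs : List Char) :
    (isStrict2Go cs none 0 = (cs.zip cs.tail).any (fun p => p.1 == p.2 && !(p.1 == 'e') && !(p.1 == 'o'))) ∧
    (∀ c : Char, ¬ (c = 'e' ∨ c = 'o') →
      isStrict2Go cs (some c) 1 =
        ((c :: cs).zip cs).any (fun p => p.1 == p.2 && !(p.1 == 'e') && !(p.1 == 'o'))) := by
  induction cs with
  | nil => exact ⟨by simp [isStrict2Go], fun c _ => by simp [isStrict2Go]⟩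
  | cons w ws ih =>
    obtain ⟨ih0, ih1⟩ := ih
    constructor
    · by_cases hw : w = 'e' ∨ w = 'o'
      · simp only [isStrict2Go, if_pos hw, ih0]
        cases ws with
        | nil => simp
        | cons v vs =>
          have : ¬ (w == v && !(w == 'e') && !(w == 'o')) = true := by
            rcases hw with h | h <;> subst h <;> simp
          simp [List.any_cons, this]
      · simp only [isStrict2Go, if_neg hw]
        have hne : (none : Option Char) ≠ some w := by simp
        simp only [if_pos hne]
        norm_num
        rw [ih1 w hw]
    · intro c hc
      by_cases hw : w = 'e' ∨ w = 'o'
      · simp only [isStrict2Go, if_pos hw, ih0]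
        have h1 : ¬ (c == w && !(c == 'e') && !(c == 'o')) = true := by
          rcases hw with h | h <;> subst h <;> simp_all [beq_iff_eq]
        cases ws with
        | nil => simp [List.any_cons, h1]
        | cons v vs =>
          have h2 : ¬ (w == v && !(w == 'e') && !(w == 'o')) = true := by
            rcases hw with h | h <;> subst h <;> simp
          simp [List.any_cons, h1, h2]
      · by_cases hcw : c = w
        · subst hcw
          have : ¬ ((some c : Option Char) ≠ some c) := by simp
          simp only [isStrict2Go, if_neg hw, if_neg this]
          have hc' := not_or.mp hc
          simp [List.any_cons, hc'.1, hc'.2]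
        · have hne : (some c : Option Char) ≠ some w := by simp [hcw]
          simp only [isStrict2Go, if_neg hw, if_pos hne]
          norm_num
          rw [ih1 w hw]
          have h1 : ¬ (c == w && !(c == 'e') && !(c == 'o')) = true := by simp [hcw]
          simp [h1]

-- ===== VERDICT (by name: the statement is the Claim_ definition above) =====
theorem isStrict2_spec : Claim_equal_isStrict2 := by
  intro word _
  unfold Spec_isStrict2 isStrict2 isStrict2_alt
  exact (isStrict2Go_pair word.toList).1
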